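-- pv_equiv track=rewrite | github.com/KaiboLiu/Algorithm_Online_Judge | HackerRank/Sum_vs_XOR_25.py | solve
-- ===== SOURCE A (Python) =====
-- def solve(n):
--     # Complete this function
--     mul = {0:2,1:1}
--     res = 1
--     while n > 0:
--         tail = n & 1
--         res *= mul[tail]
--         n >>= 1
--     return res
-- ===== SOURCE B (Python) =====
-- def solve(n):
--     # Closed form: answer is 2^(number of zero bits of n below its top bit); 1 for n <= 0.
--     if n <= 0:
--         return 1
--     return 1 << (n.bit_length() - bin(n).count("1"))
-- ===== Notes on version B (the rewrite author's own statement) =====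
-- stated objective: simpler
-- what changed: Replaces the per-bit loop multiplying by 2 for each zero bit with a closed form: 1 << (n.bit_length() - popcount(n)) for n > 0, and 1 for n <= 0.
import Mathlib
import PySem

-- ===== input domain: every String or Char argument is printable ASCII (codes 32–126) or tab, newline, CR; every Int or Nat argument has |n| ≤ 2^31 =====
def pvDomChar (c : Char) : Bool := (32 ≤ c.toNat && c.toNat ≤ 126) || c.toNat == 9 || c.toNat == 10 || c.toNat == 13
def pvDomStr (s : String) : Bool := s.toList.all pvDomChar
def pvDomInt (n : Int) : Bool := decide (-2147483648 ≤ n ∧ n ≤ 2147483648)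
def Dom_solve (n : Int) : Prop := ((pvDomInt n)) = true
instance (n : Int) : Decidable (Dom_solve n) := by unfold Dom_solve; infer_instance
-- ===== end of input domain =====

-- B replaces A's per-bit multiplicative loop by the closed form 1 << (bit_length - popcount) (simpler).

-- ===== PORT A =====
-- mul = {0:2, 1:1}
def solveMul : PySem.Dict Int Int := PySem.Dict.ofList [(0, 2), (1, 1)]

-- the while loop; n >>= 1 is floor division by 2 (exact); mul[tail] always hits a key
-- since tail = n & 1 ∈ {0,1}, so the getD default 0 is never used.
def solveLoop (n : Int) (res : Int) : Int :=
  if _h : n > 0 then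
    solveLoop (PySem.Int.floordiv n 2) (res * (solveMul.getD (PySem.Int.band n 1) 0))
  else res
termination_by n.toNat
decreasing_by
  have h2 : PySem.Int.floordiv n 2 = n / 2 := PySem.Int.floordiv_eq_ediv_of_pos (by omega)
  rw [h2]; omega

def solve (n : Int) : Int := solveLoop n 1

-- ===== PORT B =====
-- if n <= 0: return 1 ; return 1 << (n.bit_length() - bin(n).count("1"))
def solve_alt (n : Int) : Int :=
  if n ≤ 0 then 1
  else (1 : Int) <<< (PySem.Int.bitLength n - PySem.Int.bitCount n)

-- ===== PRECONDITION & SPEC =====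
def Spec_solve (n : Int) (out : Int) : Prop := out = solve_alt n
instance (n : Int) (out : Int) : Decidable (Spec_solve n out) := by unfold Spec_solve; infer_instance

-- ===== CLAIM (what is proved, stated in full; the proofs are below) =====
def Claim_equal_solve : Prop := ∀ (n : Int), Dom_solve n → Spec_solve n (solve n)

-- ===== LEMMAS AND PROOFS =====

theorem int_one_shiftLeft (e : Nat) : (1 : Int) <<< e = 2 ^ e := by
  rw [Int.shiftLeft_eq]; ring

theorem solveLoop_eq (k : Nat) : ∀ (n res : Int), n.toNat ≤ k →
    solveLoop n res = res * solve_alt n := by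
  induction k with
  | zero =>
    intro n res hk
    have hn : n ≤ 0 := by omega
    rw [solveLoop, solve_alt]
    simp [not_lt.mpr hn, hn]
  | succ k ih =>
    intro n res hk
    by_cases hn : n > 0
    · have h2 : PySem.Int.floordiv n 2 = n / 2 := PySem.Int.floordiv_eq_ediv_of_pos (by omega)
      have hrec := ih (PySem.Int.floordiv n 2) (res * (solveMul.getD (PySem.Int.band n 1) 0))
        (by rw [h2]; omega)
      rw [solveLoop, dif_pos hn, hrec]
      -- reduce to an identity about bitLength/bitCount
      have hbl := PySem.Int.bitLength_of_pos (n := n) (by omega)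
      have hbc := PySem.Int.bitCount_of_pos (n := n) (by omega)
      have hle : PySem.Int.bitCount (PySem.Int.floordiv n 2) ≤
          PySem.Int.bitLength (PySem.Int.floordiv n 2) := PySem.Int.bitCount_le_bitLength _
      have hmod : PySem.Int.band n 1 = PySem.Int.mod n 2 := PySem.Int.band_one n
      have hmodval : PySem.Int.mod n 2 = n % 2 := PySem.Int.mod_eq_emod_of_pos (by omega)
      have hn2 : n % 2 = 0 ∨ n % 2 = 1 := by omega
      by_cases hq : n / 2 ≤ 0
      · -- then n = 1 (since n > 0)
        have hn1 : n = 1 := by omega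
        subst hn1
        have e1 : solveMul.getD (PySem.Int.band 1 1) 0 = 1 := by decide
        have e2 : solve_alt (PySem.Int.floordiv 1 2) = 1 := by decide
        have e3 : solve_alt (1 : Int) = 1 := by decide
        rw [e1, e2, e3]; ring
      · have hq' : ¬ PySem.Int.floordiv n 2 ≤ 0 := by rw [h2]; exact hq
        rw [solve_alt, if_neg hq', solve_alt, if_neg (by omega : ¬ n ≤ 0)]
        rw [int_one_shiftLeft, int_one_shiftLeft, hbl, hbc]
        rcases hn2 with he | ho
        · -- even: tail = 0, mul[0] = 2
          have htail : PySem.Int.band n 1 = 0 := by rw [hmod, hmodval, he]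
          have hmul : solveMul.getD (PySem.Int.band n 1) 0 = 2 := by
            rw [htail]; decide
          have hto : (PySem.Int.mod n 2).toNat = 0 := by rw [hmodval, he]; rfl
          rw [hmul, hto]
          have hexp : PySem.Int.bitLength (PySem.Int.floordiv n 2) + 1 -
              (0 + PySem.Int.bitCount (PySem.Int.floordiv n 2)) =
              (PySem.Int.bitLength (PySem.Int.floordiv n 2) -
               PySem.Int.bitCount (PySem.Int.floordiv n 2)) + 1 := by omega
          rw [hexp, pow_succ]; ring
        · -- odd: tail = 1, mul[1] = 1
          have htail : PySem.Int.band n 1 = 1 := by rw [hmod, hmodval, ho]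
          have hmul : solveMul.getD (PySem.Int.band n 1) 0 = 1 := by
            rw [htail]; decide
          have hto : (PySem.Int.mod n 2).toNat = 1 := by rw [hmodval, ho]; rfl
          rw [hmul, hto]
          have hexp : PySem.Int.bitLength (PySem.Int.floordiv n 2) + 1 -
              (1 + PySem.Int.bitCount (PySem.Int.floordiv n 2)) =
              PySem.Int.bitLength (PySem.Int.floordiv n 2) -
              PySem.Int.bitCount (PySem.Int.floordiv n 2) := by omega
          rw [hexp]; ring
    · rw [solveLoop, dif_neg hn, solve_alt, if_pos (by omega)]
      ring

-- ===== VERDICT (by name: the statement is the Claim_ definition above) =====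
theorem solve_spec : Claim_equal_solve := by
  intro n _
  unfold Spec_solve solve
  rw [solveLoop_eq n.toNat n 1 le_rfl]
  ring
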